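-- pv_equiv track=rewrite | github.com/shrutib31/soul-buddy | sb-backend/tests/SB-Eval/VERA-MH/VERAMH/judge/llm_judge.py | _match_answer_to_options
-- ===== SOURCE A (Python) =====
-- from typing import Any, Dict, List, Optional
--
-- def _match_answer_to_options(
--     answer: str, valid_options: List[str]
-- ) -> Optional[str]:
--     """Try to match an answer to valid options using case-insensitive comparison.
--
--     Prioritizes exact matches over substring matches to avoid false matches when
--     one option is a substring of another (e.g., "Immediate risk" vs
--     "Suicidal thoughts but not immediate risk").
--     """
--     answer_lower = answer.lower().strip()
--
--     # First pass: Try exact match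
--     for option in valid_options:
--         if option.lower().strip() == answer_lower:
--             return option
--
--     # Second pass: Try substring matching only if no exact match
--     for option in valid_options:
--         if option.lower() in answer_lower or answer_lower in option.lower():
--             return option
--
--     return None
-- ===== SOURCE B (Python) =====
-- from typing import List, Optional
--
--
-- def _match_answer_to_options(
--     answer: str, valid_options: List[str]
-- ) -> Optional[str]:
--     """Single pass: return immediately on an exact (lower/strip) match; remember
--     the first substring match as a pending candidate and return it only if no
--     later option matches exactly."""
--     answer_lower = answer.lower().strip()
--     candidate = None
--     for option in valid_options:
--         option_lower = option.lower()
--         if option_lower.strip() == answer_lower: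
--             return option
--         if candidate is None and (
--             option_lower in answer_lower or answer_lower in option_lower
--         ):
--             candidate = option
--     return candidate
-- ===== Notes on version B (the rewrite author's own statement) =====
-- stated objective: alternative
-- what changed: Replaces A's two separate scans (exact pass, then substring pass) with one loop that returns eagerly on an exact match while recording the first substring hit as a pending candidate returned only after the loop.
import Mathlib
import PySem

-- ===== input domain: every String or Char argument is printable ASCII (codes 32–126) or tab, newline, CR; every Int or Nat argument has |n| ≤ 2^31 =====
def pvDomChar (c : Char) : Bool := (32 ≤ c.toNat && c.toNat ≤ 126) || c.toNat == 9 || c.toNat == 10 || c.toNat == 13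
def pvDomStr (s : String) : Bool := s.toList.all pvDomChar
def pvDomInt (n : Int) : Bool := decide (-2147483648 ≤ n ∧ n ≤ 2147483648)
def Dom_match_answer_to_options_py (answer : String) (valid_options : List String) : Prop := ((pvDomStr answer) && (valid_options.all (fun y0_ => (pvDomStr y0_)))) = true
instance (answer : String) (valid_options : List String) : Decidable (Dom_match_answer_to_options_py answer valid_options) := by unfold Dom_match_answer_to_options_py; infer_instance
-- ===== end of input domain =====

-- B replaces A's two scans with one eager-exact / pending-substring-candidate pass (alternative decomposition, same cost).

-- ===== PORT A =====
-- first pass: for option in valid_options: if option.lower().strip() == answer_lower: return option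
def pyExactLoop (answer_lower : String) : List String → Option String
  | [] => none
  | option :: rest =>
    if PySem.Str.strip (PySem.Str.lower option) = answer_lower then some option
    else pyExactLoop answer_lower rest

-- second pass: if option.lower() in answer_lower or answer_lower in option.lower(): return option
def pySubLoop (answer_lower : String) : List String → Option String
  | [] => none
  | option :: rest =>
    if (PySem.Str.isIn (PySem.Str.lower option) answer_lower
        || PySem.Str.isIn answer_lower (PySem.Str.lower option)) then some option
    else pySubLoop answer_lower rest

def match_answer_to_options_py (answer : String) (valid_options : List String) : Option String :=
  let answer_lower := PySem.Str.strip (PySem.Str.lower answer)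
  match pyExactLoop answer_lower valid_options with
  | some option => some option
  | none => pySubLoop answer_lower valid_options

-- ===== PORT B =====
-- single pass with a pending substring candidate
def altLoop (answer_lower : String) (candidate : Option String) : List String → Option String
  | [] => candidate
  | option :: rest =>
    let option_lower := PySem.Str.lower option
    if PySem.Str.strip option_lower = answer_lower then some option
    else if candidate.isNone
         && (PySem.Str.isIn option_lower answer_lower
             || PySem.Str.isIn answer_lower option_lower) then
      altLoop answer_lower (some option) rest
    else altLoop answer_lower candidate rest

def match_answer_to_options_py_alt (answer : String) (valid_options : List String) : Option String :=
  altLoop (PySem.Str.strip (PySem.Str.lower answer)) none valid_options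

-- ===== PRECONDITION & SPEC =====
def Spec_match_answer_to_options_py (answer : String) (valid_options : List String) (out : Option String) : Prop := out = match_answer_to_options_py_alt answer valid_options
instance (answer : String) (valid_options : List String) (out : Option String) : Decidable (Spec_match_answer_to_options_py answer valid_options out) := by unfold Spec_match_answer_to_options_py; infer_instance

-- ===== CLAIM (what is proved, stated in full; the proofs are below) =====
def Claim_equal_match_answer_to_options_py : Prop := ∀ (answer : String) (valid_options : List String), Dom_match_answer_to_options_py answer valid_options → Spec_match_answer_to_options_py answer valid_options (match_answer_to_options_py answer valid_options)

-- ===== LEMMAS AND PROOFS =====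
theorem altLoop_eq (al : String) (l : List String) (cand : Option String) :
    altLoop al cand l =
      match pyExactLoop al l with
      | some o => some o
      | none => match cand with
                | some c => some c
                | none => pySubLoop al l := by
  induction l generalizing cand with
  | nil => cases cand <;> rfl
  | cons o t ih =>
    simp only [altLoop, pyExactLoop, pySubLoop]
    by_cases hex : PySem.Str.strip (PySem.Str.lower o) = al
    · simp [hex]
    · simp only [hex, if_false]
      cases cand with
      | some c => simp [Option.isNone, ih]
      | none =>
        by_cases hsub : (PySem.Str.isIn (PySem.Str.lower o) al
            || PySem.Str.isIn al (PySem.Str.lower o)) = true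
        · simp only [Option.isNone, Bool.true_and, hsub, if_true, ih]
        · simp only [Option.isNone, Bool.true_and, hsub, ih]
          cases pyExactLoop al t <;> simp

-- ===== VERDICT (by name: the statement is the Claim_ definition above) =====
theorem match_answer_to_options_py_spec : Claim_equal_match_answer_to_options_py := by
  intro answer valid_options _
  unfold Spec_match_answer_to_options_py match_answer_to_options_py match_answer_to_options_py_alt
  rw [altLoop_eq]
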